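-- pv_equiv track=rewrite | github.com/andrewsipe/Filename_Tools | FNT_RegularInserterEnhanced.py | extract_width_prefix
-- ===== SOURCE A (Python) =====
-- from typing import Iterable, Sequence, Set, Tuple
--
-- WIDTH_TERMS: Set[str] = {
--     "Condensed",
--     "Compressed",
--     "Narrow",
--     "Extended",
--     "Expanded",
--     "Expand",
--     "Wide",
-- }
--
-- def extract_width_prefix(style_part: str) -> Tuple[str, str]:
--     """
--     Extract width prefix if present at the start.
--     Returns (width_prefix, remainder).
--     """
--     if not style_part:
--         return "", ""
--
--     # Sort by length to match longest first (e.g., "ExtraCondensed" before "Condensed")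
--     sorted_widths = sorted(WIDTH_TERMS, key=len, reverse=True)
--
--     for width in sorted_widths:
--         if style_part.startswith(width):
--             return width, style_part[len(width) :]
--
--     return "", style_part
-- ===== SOURCE B (Python) =====
-- from typing import Set, Tuple
--
-- WIDTH_TERMS: Set[str] = {
--     "Condensed",
--     "Compressed",
--     "Narrow",
--     "Extended",
--     "Expanded",
--     "Expand",
--     "Wide",
-- }
--
-- def extract_width_prefix(style_part: str) -> Tuple[str, str]:
--     """
--     Extract width prefix if present at the start.
--     Returns (width_prefix, remainder).
--     """
--     matches = [w for w in WIDTH_TERMS if style_part.startswith(w)]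
--     if not matches:
--         return "", style_part
--     w = max(matches, key=len)
--     return w, style_part[len(w):]
-- ===== Notes on version B (the rewrite author's own statement) =====
-- stated objective: simpler
-- what changed: B drops the length-sort entirely: it collects all prefixing terms with one comprehension and picks the longest via max(key=len); the empty-string guard disappears because no term prefixes the empty string.
import Mathlib
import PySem

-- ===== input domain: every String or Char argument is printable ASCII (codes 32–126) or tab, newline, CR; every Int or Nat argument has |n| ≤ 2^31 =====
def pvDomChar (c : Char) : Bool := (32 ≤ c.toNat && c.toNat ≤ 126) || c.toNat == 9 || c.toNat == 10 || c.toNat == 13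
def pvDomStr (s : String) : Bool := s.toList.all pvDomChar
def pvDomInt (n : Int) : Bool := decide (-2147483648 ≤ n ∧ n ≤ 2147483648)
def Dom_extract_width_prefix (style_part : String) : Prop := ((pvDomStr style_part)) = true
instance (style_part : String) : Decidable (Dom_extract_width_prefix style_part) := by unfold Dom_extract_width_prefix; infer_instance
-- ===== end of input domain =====

-- B replaces A's sort-by-length-then-first-hit with a one-pass collect of prefixing terms and max(key=len); same return value everywhere (simpler).

-- ===== PORT A =====
def pvWidthTerms : PySem.Set String :=
  PySem.Set.ofList ["Condensed", "Compressed", "Narrow", "Extended", "Expanded", "Expand", "Wide"]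

def pvFindWidth : List String → String → String × String
  | [], sp => ("", sp)
  | w :: rest, sp =>
    if PySem.Str.startswith sp w then
      (w, PySem.Str.slice sp (some (PySem.Str.len w)) none)
    else pvFindWidth rest sp

def extract_width_prefix (style_part : String) : String × String :=
  if style_part = "" then ("", "")
  else
    let sorted_widths := PySem.List.sorted pvWidthTerms (fun w => PySem.Str.len w) true
    pvFindWidth sorted_widths style_part

-- ===== PORT B =====
def extract_width_prefix_alt (style_part : String) : String × String :=
  let ms := pvWidthTerms.filter (fun w => PySem.Str.startswith style_part w)
  match PySem.List.max? ms (fun w => PySem.Str.len w) with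
  | none => ("", style_part)
  | some w => (w, PySem.Str.slice style_part (some (PySem.Str.len w)) none)

-- ===== PRECONDITION & SPEC =====
def Spec_extract_width_prefix (style_part : String) (out : String × String) : Prop := out = extract_width_prefix_alt style_part
instance (style_part : String) (out : String × String) : Decidable (Spec_extract_width_prefix style_part out) := by unfold Spec_extract_width_prefix; infer_instance

-- ===== CLAIM (what is proved, stated in full; the proofs are below) =====
def Claim_equal_extract_width_prefix : Prop := ∀ (style_part : String), Dom_extract_width_prefix style_part → Spec_extract_width_prefix style_part (extract_width_prefix style_part)

-- ===== LEMMAS AND PROOFS =====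

-- the concrete result of A's stable reverse length-sort of the term set
theorem pvSorted_eq :
    PySem.List.sorted pvWidthTerms (fun w => PySem.Str.len w) true =
      ["Compressed", "Condensed", "Extended", "Expanded", "Narrow", "Expand", "Wide"] := by
  decide

-- literal lengths of the seven width terms (the foldl of B's max(key=len) compares these)
theorem pvLen_Condensed : "Condensed".length = 9 := rfl
theorem pvLen_Compressed : "Compressed".length = 10 := rfl
theorem pvLen_Narrow : "Narrow".length = 6 := rfl
theorem pvLen_Extended : "Extended".length = 8 := rfl
theorem pvLen_Expanded : "Expanded".length = 8 := rfl
theorem pvLen_Expand : "Expand".length = 6 := rfl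
theorem pvLen_Wide : "Wide".length = 4 := rfl

-- ===== VERDICT (by name: the statement is the Claim_ definition above) =====
set_option maxHeartbeats 2000000 in
theorem extract_width_prefix_spec : Claim_equal_extract_width_prefix := by
  intro sp _
  unfold Spec_extract_width_prefix extract_width_prefix extract_width_prefix_alt
  rw [pvSorted_eq]
  by_cases hE : sp = ""
  · subst hE; decide
  · simp only [if_neg hE]
    by_cases h1 : PySem.Chars.startswith sp.toList ['C', 'o', 'n', 'd', 'e', 'n', 's', 'e', 'd'] <;>
    by_cases h2 : PySem.Chars.startswith sp.toList ['C', 'o', 'm', 'p', 'r', 'e', 's', 's', 'e', 'd'] <;>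
    by_cases h3 : PySem.Chars.startswith sp.toList ['N', 'a', 'r', 'r', 'o', 'w'] <;>
    by_cases h4 : PySem.Chars.startswith sp.toList ['E', 'x', 't', 'e', 'n', 'd', 'e', 'd'] <;>
    by_cases h5 : PySem.Chars.startswith sp.toList ['E', 'x', 'p', 'a', 'n', 'd', 'e', 'd'] <;>
    by_cases h6 : PySem.Chars.startswith sp.toList ['E', 'x', 'p', 'a', 'n', 'd'] <;>
    by_cases h7 : PySem.Chars.startswith sp.toList ['W', 'i', 'd', 'e'] <;>
    simp [pvFindWidth, pvWidthTerms, PySem.Set.ofList, PySem.List.max?, List.filter, List.foldl,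
      h1, h2, h3, h4, h5, h6, h7,
      pvLen_Condensed, pvLen_Compressed, pvLen_Narrow, pvLen_Extended, pvLen_Expanded,
      pvLen_Expand, pvLen_Wide]
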